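-- pv_equiv track=rewrite | github.com/huybkdn23/LearningPython | inheritance.py | in_a_row
-- ===== SOURCE A (Python) =====
-- def in_a_row(ranks, n):
--     """Checks whether the histogram has n ranks in a row.
--
--     hist: map from rank to frequency
--     n: number we need to get to
--     """
--     count = 0
--     for i in range(1, 15):
--         if ranks.get(i, 0):
--             count += 1
--             if count == 5: return True
--         else:
--             count = 0
--     return False
-- ===== SOURCE B (Python) =====
-- def in_a_row(ranks, n):
--     """Checks whether the histogram has n ranks in a row.
--
--     hist: map from rank to frequency
--     n: number we need to get to
--     """
--     return any(all(ranks.get(i + j, 0) for j in range(5))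
--                for i in range(1, 11))
-- ===== Notes on version B (the rewrite author's own statement) =====
-- stated objective: alternative
-- what changed: Replaced A's reset-driven running counter over ranks 1..14 with a sliding-window any/all check over the ten possible 5-rank windows starting at 1..10.
import Mathlib
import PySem

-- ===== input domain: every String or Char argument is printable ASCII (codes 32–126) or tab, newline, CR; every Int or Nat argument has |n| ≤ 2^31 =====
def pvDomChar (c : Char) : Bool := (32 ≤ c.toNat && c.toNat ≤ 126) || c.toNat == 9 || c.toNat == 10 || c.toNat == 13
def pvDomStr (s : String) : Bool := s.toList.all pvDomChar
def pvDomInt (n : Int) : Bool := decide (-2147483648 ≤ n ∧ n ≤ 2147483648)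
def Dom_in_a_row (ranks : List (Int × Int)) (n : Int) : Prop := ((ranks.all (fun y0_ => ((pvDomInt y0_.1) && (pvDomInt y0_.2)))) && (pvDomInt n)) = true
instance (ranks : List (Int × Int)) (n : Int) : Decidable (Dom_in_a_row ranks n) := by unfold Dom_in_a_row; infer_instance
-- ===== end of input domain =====

-- B replaces A's reset-driven running counter with a sliding-window check (any window of 5
-- consecutive ranks fully present); same cost, different decomposition (objective: alternative).

-- ===== PORT A =====
-- A's for-loop with early return, transcribed as structural recursion over the range list,
-- threading the running counter `count` exactly as A does.
def inARowLoopA (ranks : List (Int × Int)) : List Int → Int → Bool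
  | [], _ => false
  | i :: rest, count =>
    if PySem.Dict.getD (PySem.Dict.mk ranks) i (0:Int) != 0 then
      if count + 1 == 5 then true else inARowLoopA ranks rest (count + 1)
    else inARowLoopA ranks rest 0

def in_a_row (ranks : List (Int × Int)) (n : Int) : Bool :=
  inARowLoopA ranks (PySem.List.pyRange 1 15 1) 0

-- ===== PORT B =====
def in_a_row_alt (ranks : List (Int × Int)) (n : Int) : Bool :=
  (PySem.List.pyRange 1 11 1).any (fun i =>
    (PySem.List.pyRange 0 5 1).all (fun j => PySem.Dict.getD (PySem.Dict.mk ranks) (i + j) (0:Int) != 0))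

-- ===== PRECONDITION & SPEC =====
def Spec_in_a_row (ranks : List (Int × Int)) (n : Int) (out : Bool) : Prop := out = in_a_row_alt ranks n
instance (ranks : List (Int × Int)) (n : Int) (out : Bool) : Decidable (Spec_in_a_row ranks n out) := by unfold Spec_in_a_row; infer_instance

-- ===== CLAIM (what is proved, stated in full; the proofs are below) =====
def Claim_equal_in_a_row : Prop := ∀ (ranks : List (Int × Int)) (n : Int), Dom_in_a_row ranks n → Spec_in_a_row ranks n (in_a_row ranks n)

-- ===== LEMMAS AND PROOFS =====

-- A's counter loop with the presence tests abstracted to a list of Booleans (proof helper).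
def loopAb : List Bool → Int → Bool
  | [], _ => false
  | b :: rest, count =>
    if b then
      if count + 1 == 5 then true else loopAb rest (count + 1)
    else loopAb rest 0

lemma inARowLoopA_eq_loopAb (ranks : List (Int × Int)) (l : List Int) (c : Int) :
    inARowLoopA ranks l c =
      loopAb (l.map (fun i => PySem.Dict.getD (PySem.Dict.mk ranks) i (0:Int) != 0)) c := by
  induction l generalizing c with
  | nil => rfl
  | cons i rest ih =>
    simp only [inARowLoopA, loopAb, List.map]
    by_cases h : (PySem.Dict.getD (PySem.Dict.mk ranks) i (0:Int) != 0) = true <;>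
      simp [h, ih]

-- ===== VERDICT (by name: the statement is the Claim_ definition above) =====
theorem in_a_row_spec : Claim_equal_in_a_row := by
  intro ranks n _
  unfold Spec_in_a_row in_a_row in_a_row_alt
  have h1 : PySem.List.pyRange 1 15 1 = [1,2,3,4,5,6,7,8,9,10,11,12,13,14] := by decide
  have h2 : PySem.List.pyRange 1 11 1 = [1,2,3,4,5,6,7,8,9,10] := by decide
  have h3 : PySem.List.pyRange 0 5 1 = [0,1,2,3,4] := by decide
  rw [h1, h2, h3, inARowLoopA_eq_loopAb]
  simp only [List.map, List.any, List.all, Int.reduceAdd]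
  generalize (PySem.Dict.getD (PySem.Dict.mk ranks) 1 (0:Int) != 0) = b1
  generalize (PySem.Dict.getD (PySem.Dict.mk ranks) 2 (0:Int) != 0) = b2
  generalize (PySem.Dict.getD (PySem.Dict.mk ranks) 3 (0:Int) != 0) = b3
  generalize (PySem.Dict.getD (PySem.Dict.mk ranks) 4 (0:Int) != 0) = b4
  generalize (PySem.Dict.getD (PySem.Dict.mk ranks) 5 (0:Int) != 0) = b5
  generalize (PySem.Dict.getD (PySem.Dict.mk ranks) 6 (0:Int) != 0) = b6
  generalize (PySem.Dict.getD (PySem.Dict.mk ranks) 7 (0:Int) != 0) = b7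
  generalize (PySem.Dict.getD (PySem.Dict.mk ranks) 8 (0:Int) != 0) = b8
  generalize (PySem.Dict.getD (PySem.Dict.mk ranks) 9 (0:Int) != 0) = b9
  generalize (PySem.Dict.getD (PySem.Dict.mk ranks) 10 (0:Int) != 0) = b10
  generalize (PySem.Dict.getD (PySem.Dict.mk ranks) 11 (0:Int) != 0) = b11
  generalize (PySem.Dict.getD (PySem.Dict.mk ranks) 12 (0:Int) != 0) = b12
  generalize (PySem.Dict.getD (PySem.Dict.mk ranks) 13 (0:Int) != 0) = b13
  generalize (PySem.Dict.getD (PySem.Dict.mk ranks) 14 (0:Int) != 0) = b14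
  revert b1 b2 b3 b4 b5 b6 b7 b8 b9 b10 b11 b12 b13 b14
  decide
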